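-- pv_equiv track=rewrite | github.com/SebasTombe10/P1ADAII | noAsigno.py | prioridadesNoAsignadas
-- ===== SOURCE A (Python) =====
-- def prioridadesNoAsignadas(asignados,diccionario):
--     # Eliminar elementos de diccionario que coinciden con elementos de asignados
--     for clave, valores_lista1 in asignados.items():
--         if clave in diccionario:
--             valores_lista2 = diccionario[clave]
--             diccionario[clave] = [(m, v) for m, v in valores_lista2 if m not in valores_lista1]
--     # Almacena la suma de valores por estudiante
--     suma_valores_por_estudiante = {}
--     # Recorrer diccionario actualzado para calcular la suma de valores por estudiante
--     for estudiante, valores in diccionario.items():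
--         suma = 0
--         for materia, valor in valores:
--             if materia.startswith('M'):
--                 suma += valor
--         suma_valores_por_estudiante[estudiante] = suma
--     # diccionario en una lista de valores
--     lista_suma_valores = list(suma_valores_por_estudiante.values())
--     return lista_suma_valores
-- ===== SOURCE B (Python) =====
-- def prioridadesNoAsignadas(asignados, diccionario):
--     # Inclusion-exclusion: instead of removing the assigned pairs and then summing,
--     # sum ALL M-prefixed values and subtract the M-prefixed values that are assigned.
--     # Does not build filtered lists and does not mutate diccionario (return value only).
--     vacio = ()
--     return [
--         sum(v for m, v in valores if m.startswith('M'))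
--         - sum(v for m, v in valores
--               if m.startswith('M') and m in asignados.get(estudiante, vacio))
--         for estudiante, valores in diccionario.items()
--     ]
-- ===== Notes on version B (the rewrite author's own statement) =====
-- stated objective: alternative
-- what changed: B computes each student's result by inclusion-exclusion -- sum of all M-prefixed values minus sum of the M-prefixed values whose materia is assigned -- in one list comprehension over diccionario, never building A's filtered replacement lists, A's intermediate per-student sum dict or the final values() extraction, and never mutating diccionario (return value only).
import Mathlib
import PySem

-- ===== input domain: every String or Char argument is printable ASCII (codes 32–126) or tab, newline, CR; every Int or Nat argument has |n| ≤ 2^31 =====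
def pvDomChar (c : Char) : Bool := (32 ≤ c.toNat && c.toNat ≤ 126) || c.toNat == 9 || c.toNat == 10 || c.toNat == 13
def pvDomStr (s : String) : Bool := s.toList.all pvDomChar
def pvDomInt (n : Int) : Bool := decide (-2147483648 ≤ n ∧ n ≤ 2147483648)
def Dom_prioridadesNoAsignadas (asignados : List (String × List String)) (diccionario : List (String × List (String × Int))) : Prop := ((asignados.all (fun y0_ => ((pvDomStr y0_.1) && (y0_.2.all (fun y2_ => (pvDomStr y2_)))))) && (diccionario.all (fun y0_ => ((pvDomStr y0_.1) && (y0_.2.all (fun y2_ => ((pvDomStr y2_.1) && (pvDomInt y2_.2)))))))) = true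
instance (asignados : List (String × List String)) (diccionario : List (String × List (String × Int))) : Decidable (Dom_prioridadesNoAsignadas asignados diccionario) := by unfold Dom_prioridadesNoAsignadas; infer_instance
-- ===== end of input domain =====

-- B computes each student's sum by inclusion-exclusion (all M-values minus assigned M-values) instead of
-- A's filter-then-sum; equivalence is about the RETURN value only — A additionally mutates diccionario in place, B does not.

-- ===== PORT A =====
def prioridadesNoAsignadas (asignados : List (String × List String)) (diccionario : List (String × List (String × Int))) : List Int :=
  let asg := PySem.Dict.ofList asignados
  let dic0 := PySem.Dict.ofList diccionario
  -- for clave, valores_lista1 in asignados.items(): filter diccionario[clave] in place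
  let dic := asg.items.foldl (fun d p =>
      if d.contains p.1 then
        d.insert p.1 ((d.getD p.1 []).filter (fun mv => !(p.2.contains mv.1)))
      else d) dic0
  -- for estudiante, valores in diccionario.items(): accumulate suma into a dict
  let sumas := dic.items.foldl (fun s p =>
      s.insert p.1 (p.2.foldl (fun suma mv =>
        if PySem.Str.startswith mv.1 "M" then suma + mv.2 else suma) 0)) PySem.Dict.empty
  sumas.values

-- ===== PORT B =====
def prioridadesNoAsignadas_alt (asignados : List (String × List String)) (diccionario : List (String × List (String × Int))) : List Int :=
  let asg := PySem.Dict.ofList asignados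
  (PySem.Dict.ofList diccionario).items.map (fun p =>
    ((p.2.filter (fun mv => PySem.Str.startswith mv.1 "M")).map (fun mv => mv.2)).sum
      - ((p.2.filter (fun mv =>
            PySem.Str.startswith mv.1 "M" && (asg.getD p.1 []).contains mv.1)).map (fun mv => mv.2)).sum)

-- ===== PRECONDITION & SPEC =====
def Spec_prioridadesNoAsignadas (asignados : List (String × List String)) (diccionario : List (String × List (String × Int))) (out : List Int) : Prop := out = prioridadesNoAsignadas_alt asignados diccionario
instance (asignados : List (String × List String)) (diccionario : List (String × List (String × Int))) (out : List Int) : Decidable (Spec_prioridadesNoAsignadas asignados diccionario out) := by unfold Spec_prioridadesNoAsignadas; infer_instance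

-- ===== CLAIM (what is proved, stated in full; the proofs are below) =====
def Claim_equal_prioridadesNoAsignadas : Prop := ∀ (asignados : List (String × List String)) (diccionario : List (String × List (String × Int))), Dom_prioridadesNoAsignadas asignados diccionario → Spec_prioridadesNoAsignadas asignados diccionario (prioridadesNoAsignadas asignados diccionario)

-- ===== LEMMAS AND PROOFS =====

-- A's inner sum loop computes the sum of the M-prefixed values.
lemma pvSumLoop (l : List (String × Int)) (acc : Int) :
    l.foldl (fun suma mv => if PySem.Str.startswith mv.1 "M" then suma + mv.2 else suma) acc
      = acc + ((l.filter (fun mv => PySem.Str.startswith mv.1 "M")).map (fun mv => mv.2)).sum := by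
  induction l generalizing acc with
  | nil => simp
  | cons h t ih =>
    simp only [List.foldl_cons, List.filter_cons]
    by_cases hs : PySem.Str.startswith h.1 "M"
    · rw [if_pos hs, if_pos hs, ih, List.map_cons, List.sum_cons]; ring
    · rw [if_neg hs, if_neg hs, ih]

-- Inclusion-exclusion on one value list: summing M-values after removing the assigned pairs
-- equals the full M-sum minus the assigned M-sum.
lemma pvInclExcl (l : List (String × Int)) (nd : List String) :
    (((l.filter (fun mv => !(nd.contains mv.1))).filter
        (fun mv => PySem.Str.startswith mv.1 "M")).map (fun mv => mv.2)).sum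
      = ((l.filter (fun mv => PySem.Str.startswith mv.1 "M")).map (fun mv => mv.2)).sum
        - ((l.filter (fun mv =>
            PySem.Str.startswith mv.1 "M" && nd.contains mv.1)).map (fun mv => mv.2)).sum := by
  induction l with
  | nil => simp
  | cons h t ih =>
    by_cases hm : PySem.Str.startswith h.1 "M" = true <;> by_cases hc : nd.contains h.1 = true <;>
      simp only [List.filter_cons, hm, hc, Bool.not_true, Bool.not_false, Bool.and_true,
        Bool.and_false, Bool.true_and, Bool.false_and, Bool.and_self, if_true, if_false, Bool.false_eq_true, reduceIte,
        List.map_cons, List.sum_cons, ih] <;> ring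

-- A's first loop rewrites each entry of d pointwise: the value of a student listed in ps gets filtered.
lemma pvLoop1 (ps : List (String × List String)) (d : PySem.Dict String (List (String × Int)))
    (hps : (ps.map (fun p => p.1)).Nodup) (hd : d.keys.Nodup) :
    (ps.foldl (fun d p =>
      if d.contains p.1 then
        d.insert p.1 ((d.getD p.1 []).filter (fun mv => !(p.2.contains mv.1)))
      else d) d).items
    = d.items.map (fun q =>
        match (PySem.Dict.mk ps).get? q.1 with
        | some nd => (q.1, q.2.filter (fun mv => !(nd.contains mv.1)))
        | none => q) := by
  induction ps generalizing d with
  | nil => simp [PySem.Dict.get?]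
  | cons hp tl ih =>
    obtain ⟨k, na⟩ := hp
    rw [List.map_cons] at hps
    obtain ⟨hknotin, htl⟩ := List.nodup_cons.mp hps
    rw [List.foldl_cons]
    by_cases hc : d.contains k = true
    · -- the student k is present: its value gets filtered, other entries untouched
      rw [if_pos hc]
      set v0 := (d.getD k []).filter (fun mv => !(na.contains mv.1)) with hv0
      have hitems : (d.insert k v0).items
          = d.items.map (fun p => if p.1 == k then (k, v0) else p) :=
        PySem.Dict.items_insert_of_contains d v0 hc
      have hkeys : (d.insert k v0).keys = d.keys := by
        simp only [PySem.Dict.keys, hitems, List.map_map]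
        apply List.map_congr_left
        intro q _
        by_cases h : q.1 = k <;> simp [h]
      have htlnone : (PySem.Dict.mk tl).get? k = none := by
        rw [PySem.Dict.get?_eq_none_iff_not_mem_keys]
        simpa [PySem.Dict.keys] using hknotin
      rw [ih (d.insert k v0) htl (by rw [hkeys]; exact hd), hitems, List.map_map]
      apply List.map_congr_left
      intro q hq
      simp only [Function.comp]
      by_cases hq1 : q.1 = k
      · have hget : d.getD k [] = q.2 :=
          PySem.Dict.getD_of_mem_items d (by rw [← hq1]; exact hq) hd []
        simp only [hq1, beq_self_eq_true, if_true]
        rw [PySem.Dict.get?_mk_cons]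
        simp [htlnone, hv0, hget]
      · have hne : (q.1 == k) = false := by rw [beq_eq_false_iff_ne]; exact hq1
        have hne' : (k == q.1) = false := by
          rw [beq_eq_false_iff_ne]; exact fun h => hq1 h.symm
        simp only [hne, Bool.false_eq_true, if_false]
        rw [PySem.Dict.get?_mk_cons]
        simp [hne']
    · -- key k absent from d: this iteration does nothing
      rw [if_neg hc]
      rw [ih d htl hd]
      apply List.map_congr_left
      intro q hq
      have hqk : (k == q.1) = false := by
        rw [beq_eq_false_iff_ne]
        intro h
        apply hc
        simp only [PySem.Dict.contains, List.any_eq_true]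
        exact ⟨q, hq, by simp [h]⟩
      rw [PySem.Dict.get?_mk_cons]
      simp [hqk]

-- A's second loop over distinct student keys builds a dict whose values are the per-student sums in order.
lemma pvLoop2 (L : List (String × List (String × Int))) (hL : (L.map (fun p => p.1)).Nodup) :
    (L.foldl (fun s p =>
      s.insert p.1 (p.2.foldl (fun suma mv =>
        if PySem.Str.startswith mv.1 "M" then suma + mv.2 else suma) 0)) PySem.Dict.empty).values
    = L.map (fun p => p.2.foldl (fun suma mv =>
        if PySem.Str.startswith mv.1 "M" then suma + mv.2 else suma) 0) := by
  simp only [PySem.Dict.values]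
  rw [PySem.Dict.items_foldl_insert_fresh L (fun p => p.1)
    (fun p => p.2.foldl (fun suma mv =>
      if PySem.Str.startswith mv.1 "M" then suma + mv.2 else suma) 0)
    PySem.Dict.empty (fun a _ => PySem.Dict.contains_empty _) hL]
  simp [PySem.Dict.empty]

-- ===== VERDICT (by name: the statement is the Claim_ definition above) =====
theorem prioridadesNoAsignadas_spec : Claim_equal_prioridadesNoAsignadas := by
  intro asignados diccionario _
  simp only [Spec_prioridadesNoAsignadas, prioridadesNoAsignadas, prioridadesNoAsignadas_alt]
  have hasgkeys : ((PySem.Dict.ofList asignados).items.map (fun p => p.1)).Nodup := by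
    simpa [PySem.Dict.keys] using PySem.Dict.nodup_keys_ofList (ν := List String) asignados
  have hdickeys : (PySem.Dict.ofList diccionario).keys.Nodup :=
    PySem.Dict.nodup_keys_ofList diccionario
  rw [pvLoop1 (PySem.Dict.ofList asignados).items (PySem.Dict.ofList diccionario) hasgkeys hdickeys]
  rw [pvLoop2 _ (by
    rw [List.map_map]
    have : (PySem.Dict.ofList diccionario).items.map
        ((fun (p : String × List (String × Int)) => p.1) ∘ (fun (q : String × List (String × Int)) =>
          match (PySem.Dict.mk (PySem.Dict.ofList asignados).items).get? q.1 with
          | some nd => (q.1, q.2.filter (fun mv => !(nd.contains mv.1)))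
          | none => q))
        = (PySem.Dict.ofList diccionario).items.map (fun p => p.1) := by
      apply List.map_congr_left
      intro q _
      simp only [Function.comp]
      cases (PySem.Dict.mk (PySem.Dict.ofList asignados).items).get? q.1 <;> simp
    rw [this]
    simpa [PySem.Dict.keys] using hdickeys)]
  rw [List.map_map]
  apply List.map_congr_left
  intro q hq
  simp only [Function.comp]
  have hmk : PySem.Dict.mk (PySem.Dict.ofList asignados).items = PySem.Dict.ofList asignados := rfl
  rw [hmk]
  cases hg : (PySem.Dict.ofList asignados).get? q.1 with
  | none =>
    simp only [hg]
    rw [pvSumLoop, zero_add, PySem.Dict.getD_eq_get?_getD, hg]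
    simp
  | some nd =>
    simp only [hg]
    rw [pvSumLoop, zero_add, PySem.Dict.getD_eq_get?_getD, hg]
    simp only [Option.getD_some]
    exact pvInclExcl q.2 nd
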